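-- pv_equiv track=rewrite | github.com/kkr010128/codebert | problem146/problem146_108.py | solve
-- ===== SOURCE A (Python) =====
-- from math import gcd
--
-- mod = 10**9+7
--
-- def pow_mod(base, exp):  # [pow_mod, "i8(i8,i8)"],
--     # mod はグローバル変数を参照
--     exp %= mod - 1
--     res = 1
--     while exp:
--         if exp % 2:
--             res = res * base % mod
--         base = base * base % mod
--         exp //= 2
--     return res
--
-- def solve(N, AB):
--     n = 0
--     na = nb = nab = 0
--     Cnt = {}
--     for a, b in zip(AB[::2], AB[1::2]):
--         if (a, b) == (0, 0):
--             nab += 1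
--         elif a == 0:
--             na += 1
--         elif b == 0:
--             nb += 1
--         else:
--             if b < 0:
--                 a, b = -a, -b
--             g = gcd(a, b)
--             a //= g
--             b //= g
--             ab_fr = (a, b)
--             n += 1
--             if ab_fr in Cnt:
--                 Cnt[ab_fr] += 1
--             else:
--                 Cnt[ab_fr] = 1
--             inv = (-b, a) if a > 0 else (b, -a)
--             if inv not in Cnt:
--                 Cnt[inv] = 0
--     ans = (pow_mod(2, na) + pow_mod(2, nb) - 1) % mod
--     A = []
--     for ab_fr, cnt in Cnt.items():
--         a, b = ab_fr
--         inv = (-b, a) if a > 0 else (b, -a)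
--         cnt2 = Cnt[inv]
--         p = pow_mod(2, cnt)
--         p2 = pow_mod(2, cnt2)
--         A.append((p + p2 - 1) % mod)
--     A.sort()
--     for a in A[::2]:
--         ans = ans * a % mod
--     ans += nab - 1
--     return ans % mod
-- ===== SOURCE B (Python) =====
-- from math import gcd
--
-- mod = 10**9+7
--
-- def solve(N, AB):
--     # group vectors by the CANONICAL member of each orthogonal direction pair
--     # (dict values are (count_this_side, count_other_side)); na/nb/nab by filters;
--     # pow via the built-in pow with the same exponent reduction mod (mod-1).
--     pairs = list(zip(AB[::2], AB[1::2]))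
--     nab = sum(1 for a, b in pairs if a == 0 and b == 0)
--     na = sum(1 for a, b in pairs if a == 0 and b != 0)
--     nb = sum(1 for a, b in pairs if a != 0 and b == 0)
--     grp = {}
--     for a, b in pairs:
--         if a != 0 and b != 0:
--             if b < 0:
--                 a, b = -a, -b
--             g = gcd(a, b)
--             d = (a // g, b // g)
--             e = (-d[1], d[0]) if d[0] > 0 else (d[1], -d[0])
--             c = d if d <= e else e
--             s0, s1 = grp.get(c, (0, 0))
--             grp[c] = (s0 + 1, s1) if d == c else (s0, s1 + 1)
--     ans = (pow(2, na % (mod - 1), mod) + pow(2, nb % (mod - 1), mod) - 1) % mod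
--     for s0, s1 in grp.values():
--         f = (pow(2, s0 % (mod - 1), mod) + pow(2, s1 % (mod - 1), mod) - 1) % mod
--         ans = ans * f % mod
--     return (ans + nab - 1) % mod
-- ===== Notes on version B (the rewrite author's own statement) =====
-- stated objective: simpler
-- what changed: B replaces A's single stateful fold (5-tuple state, dict keyed by every direction with inverse directions pre-inserted at 0, then build a factor list per key, sort it and multiply every other element) by staged passes: na/nb/nab are filter-counts, the dict is keyed only by the canonical (lexicographically smaller) member of each orthogonal pair storing a pair of counts, and the answer multiplies one factor per dict entry directly - no placeholder keys, no list, no sort; modular powers use the built-in pow.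
import Mathlib
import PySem

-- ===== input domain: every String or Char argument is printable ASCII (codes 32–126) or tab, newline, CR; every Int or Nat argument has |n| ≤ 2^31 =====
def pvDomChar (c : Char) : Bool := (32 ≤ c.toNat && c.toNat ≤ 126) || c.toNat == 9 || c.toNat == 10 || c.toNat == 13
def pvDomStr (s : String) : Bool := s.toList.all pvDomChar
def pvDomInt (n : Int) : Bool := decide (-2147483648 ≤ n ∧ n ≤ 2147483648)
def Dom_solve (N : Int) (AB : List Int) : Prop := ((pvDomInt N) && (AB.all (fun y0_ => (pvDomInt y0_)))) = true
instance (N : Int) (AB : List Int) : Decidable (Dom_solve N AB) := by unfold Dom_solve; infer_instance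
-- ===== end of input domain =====

-- B replaces A's single stateful fold (5-tuple state, dict keyed by every direction with the
-- inverse directions pre-inserted at 0, then a factor list that is sorted and multiplied at
-- every other index) by staged passes: na/nb/nab as filter-counts, a dict keyed only by the
-- canonical member of each orthogonal pair holding a PAIR of counts, and a direct product of
-- one factor per entry — no placeholder keys, no list, no sort; powers via the built-in pow.

def pymod : Int := 1000000007

-- ===== PORT A =====

-- pow_mod: Python's while-loop; after `exp %= mod - 1` the exponent is a nonnegative
-- integer, represented here as the Nat it equals (exp % 2 / exp //= 2 are the Nat ops there).
def powModLoop (e : Nat) (base res : Int) : Int :=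
  if e = 0 then res
  else powModLoop (e / 2) (PySem.Int.mod (base * base) pymod)
        (if e % 2 = 1 then PySem.Int.mod (res * base) pymod else res)
  termination_by e
  decreasing_by exact Nat.div_lt_self (Nat.pos_of_ne_zero (by assumption)) one_lt_two

def powMod (base exp : Int) : Int :=
  powModLoop (PySem.Int.mod exp (pymod - 1)).toNat base 1

-- inv = (-b, a) if a > 0 else (b, -a)
def invF (k : Int × Int) : Int × Int := if k.1 > 0 then (-k.2, k.1) else (k.2, -k.1)

-- the grouping loop body of A: state (n, na, nb, nab, Cnt)
def groupStepA (st : Int × Int × Int × Int × PySem.Dict (Int × Int) Int) (p : Int × Int) :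
    Int × Int × Int × Int × PySem.Dict (Int × Int) Int :=
  let (n, na, nb, nab, cnt) := st
  if p.1 = 0 ∧ p.2 = 0 then (n, na, nb, nab + 1, cnt)
  else if p.1 = 0 then (n, na + 1, nb, nab, cnt)
  else if p.2 = 0 then (n, na, nb + 1, nab, cnt)
  else
    let a := if p.2 < 0 then -p.1 else p.1
    let b := if p.2 < 0 then -p.2 else p.2
    let g : Int := Int.gcd a b
    let a2 := PySem.Int.floordiv a g
    let b2 := PySem.Int.floordiv b g
    let ab := (a2, b2)
    let cnt1 := if cnt.contains ab then cnt.insert ab (cnt.getD ab 0 + 1) else cnt.insert ab 1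
    let iv := invF ab
    let cnt2 := if cnt1.contains iv then cnt1 else cnt1.insert iv 0
    (n + 1, na, nb, nab, cnt2)

def solve (N : Int) (AB : List Int) : Int :=
  let pairs := ((PySem.List.slice? AB none none 2).getD []).zip
               ((PySem.List.slice? AB (some 1) none 2).getD [])
  let st := pairs.foldl groupStepA (0, 0, 0, 0, PySem.Dict.empty)
  let na := st.2.1
  let nb := st.2.2.1
  let nab := st.2.2.2.1
  let cnt := st.2.2.2.2
  let ans0 := PySem.Int.mod (powMod 2 na + powMod 2 nb - 1) pymod
  let A := cnt.items.foldl (fun acc pr =>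
      -- cnt2 = Cnt[inv]: the key is always present (every key's partner is inserted with it)
      acc ++ [PySem.Int.mod (powMod 2 pr.2 + powMod 2 (cnt.getD (invF pr.1) 0) - 1) pymod]) []
  let As := PySem.List.sorted A (fun x => x) false
  let ans := ((PySem.List.slice? As none none 2).getD []).foldl
      (fun ans a => PySem.Int.mod (ans * a) pymod) ans0
  PySem.Int.mod (ans + nab - 1) pymod

-- ===== PORT B =====

-- pow(2, e % (mod - 1), mod): the built-in three-argument pow, ported as its contract
def p2 (e : Int) : Int := ((2 : Int) ^ (PySem.Int.mod e (pymod - 1)).toNat) % pymod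

-- the grouping loop body of B: dict keyed by the canonical (lexicographically smaller)
-- member of the orthogonal pair, value = (count of this direction, count of the other)
def groupStepB (grp : PySem.Dict (Int × Int) (Int × Int)) (p : Int × Int) :
    PySem.Dict (Int × Int) (Int × Int) :=
  if p.1 ≠ 0 ∧ p.2 ≠ 0 then
    let a := if p.2 < 0 then -p.1 else p.1
    let b := if p.2 < 0 then -p.2 else p.2
    let g : Int := Int.gcd a b
    let d := (PySem.Int.floordiv a g, PySem.Int.floordiv b g)
    let e := if d.1 > 0 then (-d.2, d.1) else (d.2, -d.1)
    -- c = d if d <= e else e  (Python tuple <=)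
    let c := if d.1 < e.1 ∨ (d.1 = e.1 ∧ d.2 ≤ e.2) then d else e
    let s := grp.getD c (0, 0)
    grp.insert c (if d = c then (s.1 + 1, s.2) else (s.1, s.2 + 1))
  else grp

def solve_alt (N : Int) (AB : List Int) : Int :=
  let pairs := ((PySem.List.slice? AB none none 2).getD []).zip
               ((PySem.List.slice? AB (some 1) none 2).getD [])
  let nab : Int := (pairs.filter (fun p => decide (p.1 = 0 ∧ p.2 = 0))).length
  let na : Int := (pairs.filter (fun p => decide (p.1 = 0 ∧ p.2 ≠ 0))).length
  let nb : Int := (pairs.filter (fun p => decide (p.1 ≠ 0 ∧ p.2 = 0))).length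
  let grp := pairs.foldl groupStepB PySem.Dict.empty
  let ans0 := PySem.Int.mod (p2 na + p2 nb - 1) pymod
  let ans := grp.values.foldl (fun ans s =>
      PySem.Int.mod (ans * PySem.Int.mod (p2 s.1 + p2 s.2 - 1) pymod) pymod) ans0
  PySem.Int.mod (ans + nab - 1) pymod

-- ===== PRECONDITION & SPEC =====
def Spec_solve (N : Int) (AB : List Int) (out : Int) : Prop := out = solve_alt N AB
instance (N : Int) (AB : List Int) (out : Int) : Decidable (Spec_solve N AB out) := by unfold Spec_solve; infer_instance

-- ===== CLAIM (what is proved, stated in full; the proofs are below) =====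
def Claim_equal_solve : Prop := ∀ (N : Int) (AB : List Int), Dom_solve N AB → Spec_solve N AB (solve N AB)

-- ===== LEMMAS AND PROOFS =====

theorem pymod_pos : (0 : Int) < pymod := by norm_num [pymod]

-- ---- modular arithmetic helpers (Int.emod; PySem.Int.mod agrees for the positive modulus) ----

theorem emod_mul_left (t y : Int) : (t % pymod * y) % pymod = (t * y) % pymod := by
  conv_rhs => rw [Int.mul_emod]
  rw [Int.mul_emod (t % pymod) y, Int.emod_emod_of_dvd _ dvd_rfl]

-- ---- correctness of A's binary pow loop, and powMod 2 = p2 ----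

theorem powModLoop_eq (e : Nat) (b r : Int) :
    powModLoop e b r = if e = 0 then r else (r * b ^ e) % pymod := by
  induction e using Nat.strong_induction_on generalizing b r with
  | _ e ih =>
    rw [powModLoop]
    by_cases h0 : e = 0
    · simp [h0]
    · rw [if_neg h0, ih (e / 2) (Nat.div_lt_self (Nat.pos_of_ne_zero h0) one_lt_two), if_neg h0]
      simp only [PySem.Int.mod_eq_emod_of_pos pymod_pos]
      by_cases h1 : e / 2 = 0
      · have he : e = 1 := by omega
        subst he
        norm_num
      · rw [if_neg h1]
        have hm : ((b * b) % pymod) ≡ (b * b) [ZMOD pymod] := Int.emod_emod_of_dvd _ dvd_rfl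
        have hk : ((b * b) % pymod) ^ (e / 2) % pymod = (b * b) ^ (e / 2) % pymod :=
          Int.ModEq.pow (e / 2) hm
        have hbb : (b * b) ^ (e / 2) = b ^ (2 * (e / 2)) := by
          rw [pow_mul, sq]
        by_cases h2 : e % 2 = 1
        · rw [if_pos h2]
          rw [emod_mul_left, Int.mul_emod, hk, ← Int.mul_emod, hbb]
          congr 1
          have he : e = 2 * (e / 2) + 1 := by omega
          conv_rhs => rw [he]
          rw [pow_succ]
          ring
        · rw [if_neg h2]
          rw [Int.mul_emod, hk, ← Int.mul_emod, hbb]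
          have he : 2 * (e / 2) = e := by omega
          rw [he]

theorem powMod_two_eq_p2 (e : Int) : powMod 2 e = p2 e := by
  unfold powMod p2
  rw [powModLoop_eq]
  by_cases h : (PySem.Int.mod e (pymod - 1)).toNat = 0
  · rw [if_pos h, h, pow_zero]
    norm_num [pymod]
  · rw [if_neg h, one_mul]

-- ---- direction keys, canonical members ----

def shapeK (k : Int × Int) : Prop := k.1 ≠ 0 ∧ 0 < k.2

def canonB (k : Int × Int) : Bool :=
  decide (k.1 < (invF k).1 ∨ (k.1 = (invF k).1 ∧ k.2 < (invF k).2))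

theorem shapeK_invF {k : Int × Int} (h : shapeK k) : shapeK (invF k) := by
  obtain ⟨a, b⟩ := k; obtain ⟨h1, h2⟩ := h
  simp only [invF, shapeK] at *
  split_ifs <;> constructor <;> simp <;> omega

theorem invF_invol {k : Int × Int} (h : shapeK k) : invF (invF k) = k := by
  obtain ⟨a, b⟩ := k; obtain ⟨h1, h2⟩ := h
  simp only [invF] at *
  split_ifs <;> simp_all <;> omega

theorem invF_ne {k : Int × Int} (h : shapeK k) : invF k ≠ k := by
  obtain ⟨a, b⟩ := k; obtain ⟨h1, h2⟩ := h
  simp only [invF]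
  split_ifs <;> simp [Prod.ext_iff] <;> omega

theorem invF_injOn {x y : Int × Int} (hx : shapeK x) (hy : shapeK y)
    (h : invF x = invF y) : x = y := by
  rw [← invF_invol hx, h, invF_invol hy]

theorem canonB_invF {k : Int × Int} (h : shapeK k) : canonB (invF k) = !canonB k := by
  have h2 := invF_invol h
  have h3 := invF_ne h
  simp only [canonB, h2]
  rw [← decide_not, decide_eq_decide]
  obtain ⟨a, b⟩ := k
  simp only [invF] at *
  split_ifs at * <;> simp [Prod.ext_iff] at * <;> omega

-- Python's  d <= e  coincides with strict canonicity when d ≠ e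
theorem le_iff_canonB {k : Int × Int} (hs : shapeK k) :
    (k.1 < (invF k).1 ∨ (k.1 = (invF k).1 ∧ k.2 ≤ (invF k).2)) ↔ canonB k = true := by
  have hne := invF_ne hs
  rw [canonB, decide_eq_true_iff]
  obtain ⟨a, b⟩ := k
  rcases h : invF (a, b) with ⟨x, y⟩
  rw [h] at hne
  have h' : ¬(x = a ∧ y = b) := by simpa [Prod.ext_iff] using hne
  dsimp only
  omega

-- ---- the per-pair factor, dict well-formedness (A side) ----

def goodD (d : PySem.Dict (Int × Int) Int) : Prop :=
  d.keys.Nodup ∧ ∀ k ∈ d.keys, shapeK k ∧ invF k ∈ d.keys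

def fKey (d : PySem.Dict (Int × Int) Int) (k : Int × Int) : Int :=
  PySem.Int.mod (powMod 2 (d.getD k 0) + powMod 2 (d.getD (invF k) 0) - 1) pymod

theorem fKey_invF (d : PySem.Dict (Int × Int) Int) {k : Int × Int} (hs : shapeK k) :
    fKey d (invF k) = fKey d k := by
  simp only [fKey, invF_invol hs]
  congr 1
  ring

-- ---- every-other-element machinery for A's sorted duplicate list ----

def everyOther {α : Type} : List α → List α
  | [] => []
  | [a] => [a]
  | a :: _ :: t => a :: everyOther t

def dup2 {α : Type} : List α → List α
  | [] => []
  | a :: t => a :: a :: dup2 t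

theorem dup2_perm {α : Type} (l : List α) : (dup2 l).Perm (l ++ l) := by
  induction l with
  | nil => simp [dup2]
  | cons a t ih =>
    simp only [dup2, List.cons_append]
    refine List.Perm.cons a ?_
    have : (t ++ a :: t).Perm (a :: (t ++ t)) := List.perm_middle
    exact ((ih.cons a).trans this.symm)

theorem mem_dup2 {α : Type} {x : α} {l : List α} : x ∈ dup2 l ↔ x ∈ l := by
  induction l with
  | nil => simp [dup2]
  | cons a t ih => simp [dup2, ih]

theorem dup2_pairwise {l : List Int} (h : l.Pairwise (· ≤ ·)) :
    (dup2 l).Pairwise (· ≤ ·) := by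
  induction l with
  | nil => simp [dup2]
  | cons a t ih =>
    rw [List.pairwise_cons] at h
    simp only [dup2]
    refine List.Pairwise.cons ?_ (List.Pairwise.cons ?_ (ih h.2))
    · intro b hb
      rcases List.mem_cons.mp hb with rfl | hb'
      · exact le_rfl
      · exact h.1 b (mem_dup2.mp hb')
    · intro b hb
      exact h.1 b (mem_dup2.mp hb)

theorem everyOther_dup2 {α : Type} (l : List α) : everyOther (dup2 l) = l := by
  induction l with
  | nil => rfl
  | cons a t ih => simpa [dup2, everyOther] using ih

theorem mod_mul_left (t y : Int) :
    PySem.Int.mod (PySem.Int.mod t pymod * y) pymod = PySem.Int.mod (t * y) pymod := by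
  rw [PySem.Int.mod_eq_emod_of_pos pymod_pos, PySem.Int.mod_eq_emod_of_pos pymod_pos,
      PySem.Int.mod_eq_emod_of_pos pymod_pos]
  exact emod_mul_left t y

theorem foldl_mulmod (l : List Int) (t : Int) :
    l.foldl (fun x y => PySem.Int.mod (x * y) pymod) (PySem.Int.mod t pymod)
      = PySem.Int.mod (t * l.prod) pymod := by
  induction l generalizing t with
  | nil => simp
  | cons y l ih =>
    simp only [List.foldl_cons, List.prod_cons]
    rw [mod_mul_left, ih (t * y), mul_assoc]

theorem eo_aux {α : Type} (xs : List α) :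
    List.filterMap (fun k : Nat => xs[2 * k]?) (List.range ((xs.length + 1) / 2))
      = everyOther xs := by
  induction xs using everyOther.induct with
  | case1 => simp [everyOther]
  | case2 a => simp [everyOther, List.range_succ]
  | case3 a b t ih =>
    have hlen : ((a :: b :: t).length + 1) / 2 = (t.length + 1) / 2 + 1 := by
      simp only [List.length_cons]; omega
    rw [hlen, List.range_succ_eq_map, List.filterMap_cons, List.filterMap_map]
    have h0 : (a :: b :: t)[2 * 0]? = some a := rfl
    rw [h0]
    have hf : ((fun k : Nat => (a :: b :: t)[2 * k]?) ∘ Nat.succ)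
        = fun k : Nat => t[2 * k]? := by
      funext k
      show (a :: b :: t)[2 * (k + 1)]? = t[2 * k]?
      have : 2 * (k + 1) = 2 * k + 1 + 1 := by omega
      rw [this, List.getElem?_cons_succ, List.getElem?_cons_succ]
    rw [hf, ih]
    rfl

theorem slice2 {α : Type} (xs : List α) :
    PySem.List.slice? xs none none 2 = some (everyOther xs) := by
  have h1 : PySem.List.slice? xs none none 2
      = some (List.filterMap (fun k : Nat => xs[((0:Int) + 2 * (k:Int)).toNat]?)
          (List.range (if 0 < (xs.length:Int) then (((xs.length:Int) - 0 + 2 - 1) / 2).toNat else 0))) := by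
    simp only [PySem.List.slice?, PySem.List.sliceIndices]
    norm_num
  rw [h1]
  congr 1
  have hc : (if 0 < (xs.length:Int) then (((xs.length:Int) - 0 + 2 - 1) / 2).toNat else 0)
      = (xs.length + 1) / 2 := by
    split_ifs with h
    · have : ((xs.length:Int) - 0 + 2 - 1) = ((xs.length + 1 : Nat) : Int) := by push_cast; ring
      rw [this]
      omega
    · omega
  have hf : (fun k : Nat => xs[((0:Int) + 2 * (k:Int)).toNat]?) = fun k : Nat => xs[2 * k]? := by
    funext k
    congr 1
    omega
  rw [hc, hf, eo_aux]

theorem sorted_dup (xs l : List Int) (h : xs.Perm (l ++ l)) :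
    PySem.List.sorted xs (fun x => x) false = dup2 (PySem.List.sorted l (fun x => x) false) := by
  apply PySem.List.eq_of_perm_of_pairwise_le_of_injective (fun x => x) (fun a b hab => hab)
  · refine ((PySem.List.sorted_perm xs (fun x => x) false).trans h).trans ?_
    refine List.Perm.trans ?_ (dup2_perm (PySem.List.sorted l (fun x => x) false)).symm
    exact List.Perm.append (PySem.List.sorted_perm l (fun x => x) false).symm
      (PySem.List.sorted_perm l (fun x => x) false).symm
  · exact PySem.List.sorted_pairwise xs (fun x => x)
  · exact dup2_pairwise (PySem.List.sorted_pairwise l (fun x => x))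

-- the non-canonical keys are exactly the invF-images of the canonical ones
theorem filter_not_canon_perm (d : PySem.Dict (Int × Int) Int) (h : goodD d) :
    (d.keys.filter (fun k => !canonB k)).Perm
      ((d.keys.filter canonB).map invF) := by
  obtain ⟨hnd, hcl⟩ := h
  rw [List.perm_ext_iff_of_nodup (hnd.filter _) ?nd2]
  case nd2 =>
    refine List.Nodup.map_on ?_ (hnd.filter _)
    intro x hx y hy hxy
    exact invF_injOn (hcl x (List.mem_of_mem_filter hx)).1 (hcl y (List.mem_of_mem_filter hy)).1 hxy
  intro k
  simp only [List.mem_filter, List.mem_map]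
  constructor
  · rintro ⟨hk, hnc⟩
    obtain ⟨hs, hinv⟩ := hcl k hk
    refine ⟨invF k, ⟨hinv, ?_⟩, invF_invol hs⟩
    rw [canonB_invF hs]
    simp only [Bool.not_eq_eq_eq_not] at hnc ⊢
    simp at hnc
    simp [hnc]
  · rintro ⟨y, ⟨hy, hcy⟩, rfl⟩
    obtain ⟨hs, hinv⟩ := hcl y hy
    refine ⟨hinv, ?_⟩
    rw [canonB_invF hs, hcy]
    rfl

theorem keys_map_perm (d : PySem.Dict (Int × Int) Int) (h : goodD d) :
    (d.keys.map (fKey d)).Perm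
      ((d.keys.filter canonB).map (fKey d) ++ (d.keys.filter canonB).map (fKey d)) := by
  have h1 : d.keys.Perm (d.keys.filter canonB ++ d.keys.filter (fun k => !canonB k)) :=
    (List.filter_append_perm canonB d.keys).symm
  refine (h1.map (fKey d)).trans ?_
  rw [List.map_append]
  refine List.Perm.append_left _ ?_
  refine ((filter_not_canon_perm d h).map (fKey d)).trans ?_
  rw [List.map_map]
  apply List.Perm.of_eq
  apply List.map_congr_left
  intro k hk
  exact fKey_invF d (h.2 k (List.mem_of_mem_filter hk)).1

-- A's tail (build factor list, sort, multiply every other element) as a canonical-key product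
theorem ansA_eq (cnt : PySem.Dict (Int × Int) Int) (hd : goodD cnt) (t : Int) :
    ((PySem.List.slice? (PySem.List.sorted
        (cnt.items.foldl (fun acc pr =>
          acc ++ [PySem.Int.mod (powMod 2 pr.2 + powMod 2 (cnt.getD (invF pr.1) 0) - 1) pymod]) [])
        (fun x => x) false) none none 2).getD []).foldl
      (fun ans a => PySem.Int.mod (ans * a) pymod) (PySem.Int.mod t pymod)
    = PySem.Int.mod (t * ((cnt.keys.filter canonB).map (fKey cnt)).prod) pymod := by
  have hnd := hd.1
  have hA : cnt.items.foldl (fun acc pr =>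
      acc ++ [PySem.Int.mod (powMod 2 pr.2 + powMod 2 (cnt.getD (invF pr.1) 0) - 1) pymod]) []
      = cnt.keys.map (fKey cnt) := by
    rw [PySem.List.foldl_append_singleton_eq_map, List.nil_append,
        PySem.Dict.items_eq_map_keys cnt hnd 0, List.map_map]
    rfl
  rw [hA, sorted_dup _ _ (keys_map_perm cnt hd), slice2, Option.getD_some, everyOther_dup2,
      foldl_mulmod]
  rw [(PySem.List.sorted_perm ((cnt.keys.filter canonB).map (fKey cnt)) (fun x => x) false).prod_eq]

-- ---- normalised key of a non-degenerate vector ----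

def normKey (q : Int × Int) : Int × Int :=
  let a := if q.2 < 0 then -q.1 else q.1
  let b := if q.2 < 0 then -q.2 else q.2
  (PySem.Int.floordiv a (Int.gcd a b), PySem.Int.floordiv b (Int.gcd a b))

theorem shape_norm (a b : Int) (ha : a ≠ 0) (hb : 0 < b) :
    shapeK (PySem.Int.floordiv a (Int.gcd a b), PySem.Int.floordiv b (Int.gcd a b)) := by
  have hg : (0 : Int) < (Int.gcd a b : Int) := by
    exact_mod_cast Nat.pos_of_ne_zero (fun h0 => ha (Int.eq_zero_of_gcd_eq_zero_left h0))
  have hdva : ((Int.gcd a b : Int)) ∣ a := Int.gcd_dvd_left a b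
  have hdvb : ((Int.gcd a b : Int)) ∣ b := Int.gcd_dvd_right a b
  rw [PySem.Int.floordiv_eq_ediv_of_pos hg, PySem.Int.floordiv_eq_ediv_of_pos hg]
  constructor
  · intro h0
    have h0' : a / ((Int.gcd a b : Int)) = 0 := h0
    have := Int.ediv_mul_cancel hdva
    rw [h0', zero_mul] at this
    exact ha this.symm
  · show (0 : Int) < b / ((Int.gcd a b : Int))
    have hmul := Int.ediv_mul_cancel hdvb
    by_contra hle
    rw [Int.not_lt] at hle
    nlinarith

theorem shapeK_normKey {q : Int × Int} (h1 : q.1 ≠ 0) (h2 : q.2 ≠ 0) : shapeK (normKey q) := by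
  unfold normKey
  by_cases hneg : q.2 < 0
  · rw [if_pos hneg, if_pos hneg]
    exact shape_norm (-q.1) (-q.2) (neg_ne_zero.mpr h1) (by omega)
  · rw [if_neg hneg, if_neg hneg]
    exact shape_norm q.1 q.2 h1 (by omega)

-- ---- A's fold: numeric components are filter-counts ----

theorem foldA_counts (l : List (Int × Int)) (n na nb nab : Int)
    (c : PySem.Dict (Int × Int) Int) :
    (l.foldl groupStepA (n, na, nb, nab, c)).2.1
        = na + ((l.filter (fun p => decide (p.1 = 0 ∧ p.2 ≠ 0))).length : Int)
  ∧ (l.foldl groupStepA (n, na, nb, nab, c)).2.2.1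
        = nb + ((l.filter (fun p => decide (p.1 ≠ 0 ∧ p.2 = 0))).length : Int)
  ∧ (l.foldl groupStepA (n, na, nb, nab, c)).2.2.2.1
        = nab + ((l.filter (fun p => decide (p.1 = 0 ∧ p.2 = 0))).length : Int) := by
  induction l generalizing n na nb nab c with
  | nil => simp
  | cons q t ih =>
    simp only [List.foldl_cons, List.filter_cons]
    by_cases h1 : q.1 = 0 ∧ q.2 = 0
    · have hA : groupStepA (n, na, nb, nab, c) q = (n, na, nb, nab + 1, c) := by
        simp only [groupStepA]; rw [if_pos h1]
      rw [hA]
      obtain ⟨e1, e2, e3⟩ := ih n na nb (nab + 1) c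
      refine ⟨?_, ?_, ?_⟩ <;> simp [e1, e2, e3, h1.1, h1.2] <;> push_cast <;> ring
    · by_cases h2 : q.1 = 0
      · have hA : groupStepA (n, na, nb, nab, c) q = (n, na + 1, nb, nab, c) := by
          simp only [groupStepA]; rw [if_neg h1, if_pos h2]
        rw [hA]
        obtain ⟨e1, e2, e3⟩ := ih n (na + 1) nb nab c
        have hq2 : q.2 ≠ 0 := fun h => h1 ⟨h2, h⟩
        refine ⟨?_, ?_, ?_⟩ <;> simp [e1, e2, e3, h2, hq2] <;> push_cast <;> ring
      · by_cases h3 : q.2 = 0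
        · have hA : groupStepA (n, na, nb, nab, c) q = (n, na, nb + 1, nab, c) := by
            simp only [groupStepA]; rw [if_neg h1, if_neg h2, if_pos h3]
          rw [hA]
          obtain ⟨e1, e2, e3⟩ := ih n na (nb + 1) nab c
          refine ⟨?_, ?_, ?_⟩ <;> simp [e1, e2, e3, h2, h3] <;> push_cast <;> ring
        · have hA : ∃ c', groupStepA (n, na, nb, nab, c) q = (n + 1, na, nb, nab, c') := by
            simp only [groupStepA]; rw [if_neg h1, if_neg h2, if_neg h3]; exact ⟨_, rfl⟩
          obtain ⟨c', hA⟩ := hA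
          rw [hA]
          obtain ⟨e1, e2, e3⟩ := ih (n + 1) na nb nab c'
          refine ⟨?_, ?_, ?_⟩ <;> simp [e1, e2, e3, h2, h3]

-- ---- A's fold: the dict component as its own fold ----

def dictStepA (cnt : PySem.Dict (Int × Int) Int) (p : Int × Int) :
    PySem.Dict (Int × Int) Int :=
  if p.1 = 0 ∧ p.2 = 0 then cnt
  else if p.1 = 0 then cnt
  else if p.2 = 0 then cnt
  else
    let ab := normKey p
    let cnt1 := if cnt.contains ab then cnt.insert ab (cnt.getD ab 0 + 1) else cnt.insert ab 1
    if cnt1.contains (invF ab) then cnt1 else cnt1.insert (invF ab) 0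

theorem stepA_dict (s : Int × Int × Int × Int × PySem.Dict (Int × Int) Int) (p : Int × Int) :
    (groupStepA s p).2.2.2.2 = dictStepA s.2.2.2.2 p := by
  obtain ⟨n, na, nb, nab, cnt⟩ := s
  simp only [groupStepA, dictStepA, normKey]
  split_ifs <;> rfl

theorem foldA_dict (l : List (Int × Int)) :
    ∀ (s : Int × Int × Int × Int × PySem.Dict (Int × Int) Int),
    (l.foldl groupStepA s).2.2.2.2 = l.foldl dictStepA s.2.2.2.2 := by
  induction l with
  | nil => intro s; rfl
  | cons q t ih =>
    intro s
    rw [List.foldl_cons, List.foldl_cons, ← stepA_dict]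
    exact ih _

-- unified form of A's dict step on a non-degenerate vector
theorem dictStepA_main (cnt : PySem.Dict (Int × Int) Int) (p : Int × Int)
    (h2 : p.1 ≠ 0) (h3 : p.2 ≠ 0) :
    dictStepA cnt p =
      (let t := cnt.insert (normKey p) (cnt.getD (normKey p) 0 + 1);
       if t.contains (invF (normKey p)) then t else t.insert (invF (normKey p)) 0) := by
  simp only [dictStepA]
  rw [if_neg (fun h => h2 h.1), if_neg h2, if_neg h3]
  by_cases hc : cnt.contains (normKey p)
  · rw [if_pos hc]
  · rw [if_neg hc, PySem.Dict.getD_of_not_contains _ _ (Bool.not_eq_true _ ▸ hc)]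
    norm_num

-- canonical key picked by B's loop
def canonKey (q : Int × Int) : Int × Int :=
  if (normKey q).1 < (invF (normKey q)).1 ∨
     ((normKey q).1 = (invF (normKey q)).1 ∧ (normKey q).2 ≤ (invF (normKey q)).2)
  then normKey q else invF (normKey q)

theorem groupStepB_main (grp : PySem.Dict (Int × Int) (Int × Int)) (p : Int × Int)
    (h2 : p.1 ≠ 0) (h3 : p.2 ≠ 0) :
    groupStepB grp p =
      grp.insert (canonKey p)
        (if normKey p = canonKey p
         then ((grp.getD (canonKey p) (0, 0)).1 + 1, (grp.getD (canonKey p) (0, 0)).2)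
         else ((grp.getD (canonKey p) (0, 0)).1, (grp.getD (canonKey p) (0, 0)).2 + 1)) := by
  simp only [groupStepB, canonKey, normKey, invF]
  rw [if_pos ⟨h2, h3⟩]

theorem canonKey_cases {q : Int × Int} (h2 : q.1 ≠ 0) (h3 : q.2 ≠ 0) :
    (canonB (normKey q) = true ∧ canonKey q = normKey q) ∨
    (canonB (normKey q) = false ∧ canonKey q = invF (normKey q)) := by
  have hs := shapeK_normKey h2 h3
  unfold canonKey
  by_cases hb : canonB (normKey q) = true
  · exact Or.inl ⟨hb, by rw [if_pos ((le_iff_canonB hs).mpr hb)]⟩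
  · refine Or.inr ⟨Bool.not_eq_true _ ▸ hb, ?_⟩
    rw [if_neg (fun h => hb ((le_iff_canonB hs).mp h))]

theorem canonB_canonKey {q : Int × Int} (h2 : q.1 ≠ 0) (h3 : q.2 ≠ 0) :
    canonB (canonKey q) = true := by
  have hs := shapeK_normKey h2 h3
  rcases canonKey_cases h2 h3 with ⟨hb, he⟩ | ⟨hb, he⟩
  · rw [he]; exact hb
  · rw [he, canonB_invF hs, hb]; rfl

theorem shapeK_canonKey {q : Int × Int} (h2 : q.1 ≠ 0) (h3 : q.2 ≠ 0) :
    shapeK (canonKey q) := by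
  have hs := shapeK_normKey h2 h3
  rcases canonKey_cases h2 h3 with ⟨_, he⟩ | ⟨_, he⟩ <;> rw [he]
  · exact hs
  · exact shapeK_invF hs

-- ---- the relation between A's dict and B's dict ----

def RelAB (cA : PySem.Dict (Int × Int) Int) (g : PySem.Dict (Int × Int) (Int × Int)) : Prop :=
  goodD cA ∧ g.keys.Nodup ∧
  (∀ k, k ∈ g.keys ↔ (k ∈ cA.keys ∧ canonB k = true)) ∧
  (∀ k ∈ g.keys, g.getD k (0, 0) = (cA.getD k 0, cA.getD (invF k) 0))

theorem Rel_empty : RelAB PySem.Dict.empty PySem.Dict.empty := by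
  refine ⟨⟨PySem.Dict.nodup_keys_empty, ?_⟩, PySem.Dict.nodup_keys_empty, ?_, ?_⟩ <;>
    simp [PySem.Dict.keys_empty]

theorem goodD_update (cnt : PySem.Dict (Int × Int) Int) (h : goodD cnt)
    (ab : Int × Int) (hs : shapeK ab) (v : Int) :
    goodD (if (cnt.insert ab v).contains (invF ab) then cnt.insert ab v
           else (cnt.insert ab v).insert (invF ab) 0) := by
  obtain ⟨hnd, hcl⟩ := h
  split_ifs with hc
  · refine ⟨PySem.Dict.nodup_keys_insert _ _ _ hnd, ?_⟩
    intro k hk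
    rcases (PySem.Dict.mem_keys_insert _ _ _ _).mp hk with rfl | hk'
    · exact ⟨hs, (PySem.Dict.contains_iff_mem_keys _ _).mp hc⟩
    · obtain ⟨hs', hi'⟩ := hcl k hk'
      exact ⟨hs', (PySem.Dict.mem_keys_insert _ _ _ _).mpr (Or.inr hi')⟩
  · refine ⟨PySem.Dict.nodup_keys_insert _ _ _ (PySem.Dict.nodup_keys_insert _ _ _ hnd), ?_⟩
    intro k hk
    rcases (PySem.Dict.mem_keys_insert _ _ _ _).mp hk with rfl | hk'
    · refine ⟨shapeK_invF hs, ?_⟩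
      rw [invF_invol hs]
      exact (PySem.Dict.mem_keys_insert _ _ _ _).mpr
        (Or.inr ((PySem.Dict.mem_keys_insert _ _ _ _).mpr (Or.inl rfl)))
    · rcases (PySem.Dict.mem_keys_insert _ _ _ _).mp hk' with rfl | hk''
      · exact ⟨hs, (PySem.Dict.mem_keys_insert _ _ _ _).mpr (Or.inl rfl)⟩
      · obtain ⟨hs', hi'⟩ := hcl k hk''
        exact ⟨hs', (PySem.Dict.mem_keys_insert _ _ _ _).mpr
          (Or.inr ((PySem.Dict.mem_keys_insert _ _ _ _).mpr (Or.inr hi')))⟩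

-- behaviour of A's unified dict step: getD and keys
theorem stepA_getD (cnt : PySem.Dict (Int × Int) Int) (d : Int × Int) (hs : shapeK d)
    (k : Int × Int) :
    (let t := cnt.insert d (cnt.getD d 0 + 1);
     if t.contains (invF d) then t else t.insert (invF d) 0).getD k 0
      = if k = d then cnt.getD d 0 + 1 else cnt.getD k 0 := by
  have hne : invF d ≠ d := invF_ne hs
  by_cases hc : (cnt.insert d (cnt.getD d 0 + 1)).contains (invF d)
  · simp only [if_pos hc]
    rw [PySem.Dict.getD_insert]
  · simp only [if_neg hc]
    by_cases hk : k = invF d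
    · subst hk
      rw [PySem.Dict.getD_insert_self, if_neg hne]
      have hcc : cnt.contains (invF d) = false := by
        have := PySem.Dict.contains_insert cnt d (invF d) (cnt.getD d 0 + 1)
        rw [Bool.not_eq_true] at hc
        rw [this] at hc
        simp only [Bool.or_eq_false_iff] at hc
        exact hc.2
      rw [PySem.Dict.getD_of_not_contains _ _ hcc]
    · rw [PySem.Dict.getD_insert_of_ne _ _ _ hk, PySem.Dict.getD_insert]

theorem stepA_keys (cnt : PySem.Dict (Int × Int) Int) (d : Int × Int) (hd : goodD cnt)
    (hs : shapeK d) (k : Int × Int) :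
    (k ∈ (let t := cnt.insert d (cnt.getD d 0 + 1);
          if t.contains (invF d) then t else t.insert (invF d) 0).keys)
      ↔ (k = d ∨ k = invF d ∨ k ∈ cnt.keys) := by
  by_cases hc : (cnt.insert d (cnt.getD d 0 + 1)).contains (invF d)
  · simp only [if_pos hc]
    rw [PySem.Dict.mem_keys_insert]
    have hiv : invF d ∈ cnt.keys ∨ invF d = d := by
      rcases (PySem.Dict.mem_keys_insert _ _ _ _).mp
        ((PySem.Dict.contains_iff_mem_keys _ _).mp hc) with h | h
      · exact Or.inr h
      · exact Or.inl h
    constructor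
    · rintro (rfl | h)
      · exact Or.inl rfl
      · exact Or.inr (Or.inr h)
    · rintro (rfl | rfl | h)
      · exact Or.inl rfl
      · rcases hiv with h | h
        · exact Or.inr h
        · exact Or.inl h
      · exact Or.inr h
  · simp only [if_neg hc]
    rw [PySem.Dict.mem_keys_insert, PySem.Dict.mem_keys_insert]
    tauto

theorem Rel_step (cA : PySem.Dict (Int × Int) Int) (g : PySem.Dict (Int × Int) (Int × Int))
    (q : Int × Int) (h : RelAB cA g) : RelAB (dictStepA cA q) (groupStepB g q) := by
  obtain ⟨hgd, hnd, hmem, hval⟩ := h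
  by_cases h2 : q.1 = 0
  · have hA : dictStepA cA q = cA := by
      simp only [dictStepA]
      by_cases hz : q.2 = 0
      · rw [if_pos ⟨h2, hz⟩]
      · rw [if_neg (fun h => hz h.2), if_pos h2]
    have hB : groupStepB g q = g := by
      simp only [groupStepB]
      rw [if_neg (fun h => h.1 h2)]
    rw [hA, hB]; exact ⟨hgd, hnd, hmem, hval⟩
  by_cases h3 : q.2 = 0
  · have hA : dictStepA cA q = cA := by
      simp only [dictStepA]
      rw [if_neg (fun h => h2 h.1), if_neg h2, if_pos h3]
    have hB : groupStepB g q = g := by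
      simp only [groupStepB]
      rw [if_neg (fun h => h.2 h3)]
    rw [hA, hB]; exact ⟨hgd, hnd, hmem, hval⟩
  -- main case
  have hsd : shapeK (normKey q) := shapeK_normKey h2 h3
  have hsc : shapeK (canonKey q) := shapeK_canonKey h2 h3
  have hcbc : canonB (canonKey q) = true := canonB_canonKey h2 h3
  rw [dictStepA_main cA q h2 h3, groupStepB_main g q h2 h3]
  have hgetD := stepA_getD cA (normKey q) hsd
  have hkeysA := stepA_keys cA (normKey q) hgd hsd
  set d := normKey q with hdq
  set c := canonKey q with hcq
  have hgoodA' : goodD (let t := cA.insert d (cA.getD d 0 + 1);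
      if t.contains (invF d) then t else t.insert (invF d) 0) := by
    have h0 := goodD_update cA hgd d hsd (cA.getD d 0 + 1)
    by_cases hcc : (cA.insert d (cA.getD d 0 + 1)).contains (invF d)
    · simpa only [if_pos hcc] using (by rwa [if_pos hcc] at h0)
    · simpa only [if_neg hcc] using (by rwa [if_neg hcc] at h0)
  -- the two membership directions between {d, invF d} and c
  have hdc : canonB d = true → d = c := by
    intro hb
    rcases canonKey_cases h2 h3 with ⟨_, he⟩ | ⟨hb', _⟩
    · exact he.symm
    · rw [hb] at hb'; cases hb'
  have hivc : canonB d = false → invF d = c := by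
    intro hb
    rcases canonKey_cases h2 h3 with ⟨hb', _⟩ | ⟨_, he⟩
    · rw [hb] at hb'; cases hb'
    · exact he.symm
  have hciv : c = d ∨ c = invF d := by
    rcases canonKey_cases h2 h3 with ⟨_, he⟩ | ⟨_, he⟩
    · exact Or.inl he
    · exact Or.inr he
  have hinvc : invF c = d ∨ invF c = invF d := by
    rcases hciv with he | he
    · exact Or.inr (by rw [he])
    · exact Or.inl (by rw [he, invF_invol hsd])
  -- closure: d ∈ cA.keys ↔ invF d ∈ cA.keys
  have hclos : d ∈ cA.keys ↔ invF d ∈ cA.keys := by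
    constructor
    · intro h; exact (hgd.2 d h).2
    · intro h
      have := (hgd.2 (invF d) h).2
      rwa [invF_invol hsd] at this
  refine ⟨hgoodA', PySem.Dict.nodup_keys_insert _ _ _ hnd, ?_, ?_⟩
  · -- membership
    intro k
    rw [PySem.Dict.mem_keys_insert, hkeysA k]
    constructor
    · rintro (rfl | hk)
      · constructor
        · rcases hciv with he | he
          · exact Or.inl he
          · exact Or.inr (Or.inl he)
        · exact hcbc
      · obtain ⟨hk1, hk2⟩ := (hmem k).mp hk
        exact ⟨Or.inr (Or.inr hk1), hk2⟩
    · rintro ⟨(rfl | rfl | hk), hcb⟩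
      · rcases Bool.eq_false_or_eq_true (canonB d) with hb | hb
        · exact Or.inl (hdc hb)
        · rw [hb] at hcb; cases hcb
      · rw [canonB_invF hsd] at hcb
        rcases Bool.eq_false_or_eq_true (canonB d) with hb | hb
        · rw [hb] at hcb; simp at hcb
        · exact Or.inl (hivc hb)
      · exact Or.inr ((hmem k).mpr ⟨hk, hcb⟩)
  · -- values
    intro k hk
    rw [PySem.Dict.mem_keys_insert] at hk
    by_cases hkc : k = c
    · rw [hkc, PySem.Dict.getD_insert_self]
      have hs_val : g.getD c (0, 0) = (cA.getD c 0, cA.getD (invF c) 0) := by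
        by_cases hkin : c ∈ g.keys
        · exact hval c hkin
        · have hgc : g.contains c = false := by
            rw [Bool.eq_false_iff]; intro hc'
            exact hkin ((PySem.Dict.contains_iff_mem_keys _ _).mp hc')
          rw [PySem.Dict.getD_of_not_contains _ _ hgc]
          have hnotA : c ∉ cA.keys := fun hin => hkin ((hmem c).mpr ⟨hin, hcbc⟩)
          have hnotA2 : invF c ∉ cA.keys := by
            intro hin
            apply hnotA
            have := (hgd.2 (invF c) hin).2
            rwa [invF_invol hsc] at this
          have hca : cA.contains c = false := by
            rw [Bool.eq_false_iff]; intro hc'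
            exact hnotA ((PySem.Dict.contains_iff_mem_keys _ _).mp hc')
          have hca2 : cA.contains (invF c) = false := by
            rw [Bool.eq_false_iff]; intro hc'
            exact hnotA2 ((PySem.Dict.contains_iff_mem_keys _ _).mp hc')
          rw [PySem.Dict.getD_of_not_contains _ _ hca,
              PySem.Dict.getD_of_not_contains _ _ hca2]
      rcases hciv with he | he
      · -- c = d: the vector's own direction is canonical
        have hne2 : invF c ≠ d := by
          rw [he]; exact invF_ne hsd
        rw [if_pos he.symm, hs_val, hgetD c, if_pos he, hgetD (invF c), if_neg hne2]
        simp [he]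
      · -- c = invF d: the partner is canonical
        have hdc_ne : d ≠ c := by
          rw [he]; intro hcon
          exact invF_ne hsd hcon.symm
        have hivk : invF c = d := by
          rw [he, invF_invol hsd]
        rw [if_neg hdc_ne, hs_val, hgetD c, if_neg (fun hcc => hdc_ne hcc.symm),
            hgetD (invF c), if_pos hivk, hivk]
    · -- untouched key
      have hk' : k ∈ g.keys := hk.resolve_left hkc
      obtain ⟨hkA, hkcb⟩ := (hmem k).mp hk'
      have hks : shapeK k := (hgd.2 k hkA).1
      have hkd : k ≠ d := by
        intro hcon
        rw [hcon] at hkcb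
        rcases Bool.eq_false_or_eq_true (canonB d) with hb | hb
        · exact hkc (hcon.trans (hdc hb))
        · rw [hb] at hkcb; cases hkcb
      have hkiv : k ≠ invF d := by
        intro hcon
        have hb : canonB d = false := by
          have := canonB_invF hsd
          rw [← hcon, hkcb] at this
          rcases Bool.eq_false_or_eq_true (canonB d) with hb | hb
          · rw [hb] at this; cases this
          · exact hb
        exact hkc (by rw [hcon]; exact hivc hb)
      have hinvkd : invF k ≠ d := by
        intro hcon
        apply hkiv
        rw [← hcon, invF_invol hks]
      rw [PySem.Dict.getD_insert_of_ne _ _ _ hkc, hval k hk', hgetD k, if_neg hkd,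
          hgetD (invF k), if_neg hinvkd]

theorem Rel_fold (l : List (Int × Int)) :
    ∀ (cA : PySem.Dict (Int × Int) Int) (g : PySem.Dict (Int × Int) (Int × Int)),
    RelAB cA g → RelAB (l.foldl dictStepA cA) (l.foldl groupStepB g) := by
  induction l with
  | nil => intro cA g h; exact h
  | cons q t ih =>
    intro cA g h
    rw [List.foldl_cons, List.foldl_cons]
    exact ih _ _ (Rel_step cA g q h)

-- B's value fold as a product over its keys
theorem foldl_mulmod_map {α : Type} (F : α → Int) (l : List α) (t : Int) :
    l.foldl (fun x y => PySem.Int.mod (x * F y) pymod) (PySem.Int.mod t pymod)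
      = PySem.Int.mod (t * (l.map F).prod) pymod := by
  induction l generalizing t with
  | nil => simp
  | cons y l ih =>
    simp only [List.foldl_cons, List.map_cons, List.prod_cons]
    rw [mod_mul_left, ih (t * F y), mul_assoc]

theorem ansB_eq (g : PySem.Dict (Int × Int) (Int × Int)) (hnd : g.keys.Nodup) (t : Int) :
    g.values.foldl (fun ans s =>
        PySem.Int.mod (ans * PySem.Int.mod (p2 s.1 + p2 s.2 - 1) pymod) pymod)
      (PySem.Int.mod t pymod)
    = PySem.Int.mod (t * (g.keys.map (fun k =>
        PySem.Int.mod (p2 (g.getD k (0, 0)).1 + p2 (g.getD k (0, 0)).2 - 1) pymod)).prod)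
        pymod := by
  rw [PySem.Dict.values_eq_map_keys g hnd (0, 0), List.foldl_map]
  exact foldl_mulmod_map
    (fun k => PySem.Int.mod (p2 (g.getD k (0, 0)).1 + p2 (g.getD k (0, 0)).2 - 1) pymod) g.keys t

-- the two products agree
theorem prod_eq_of_Rel (cA : PySem.Dict (Int × Int) Int)
    (g : PySem.Dict (Int × Int) (Int × Int)) (h : RelAB cA g) :
    (g.keys.map (fun k =>
        PySem.Int.mod (p2 (g.getD k (0, 0)).1 + p2 (g.getD k (0, 0)).2 - 1) pymod)).prod
      = ((cA.keys.filter canonB).map (fKey cA)).prod := by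
  obtain ⟨hgd, hnd, hmem, hval⟩ := h
  have hperm : g.keys.Perm (cA.keys.filter canonB) := by
    rw [List.perm_ext_iff_of_nodup hnd (hgd.1.filter _)]
    intro k
    rw [List.mem_filter, hmem k]
  have hmap : g.keys.map (fun k =>
      PySem.Int.mod (p2 (g.getD k (0, 0)).1 + p2 (g.getD k (0, 0)).2 - 1) pymod)
      = g.keys.map (fKey cA) := by
    apply List.map_congr_left
    intro k hk
    rw [hval k hk, fKey, powMod_two_eq_p2, powMod_two_eq_p2]
  rw [hmap]
  exact (hperm.map (fKey cA)).prod_eq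

theorem solve_eq (N : Int) (AB : List Int) : solve N AB = solve_alt N AB := by
  unfold solve solve_alt
  dsimp only
  set pairs := ((PySem.List.slice? AB none none 2).getD []).zip
               ((PySem.List.slice? AB (some 1) none 2).getD []) with hp
  obtain ⟨e1, e2, e3⟩ := foldA_counts pairs 0 0 0 0 PySem.Dict.empty
  have hdict := foldA_dict pairs (0, 0, 0, 0, PySem.Dict.empty)
  have hrel := Rel_fold pairs PySem.Dict.empty PySem.Dict.empty Rel_empty
  rw [← hdict] at hrel
  set cA := (pairs.foldl groupStepA (0, 0, 0, 0, PySem.Dict.empty)).2.2.2.2 with hca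
  set g := pairs.foldl groupStepB PySem.Dict.empty with hg
  rw [e1, e2, e3]
  simp only [zero_add]
  rw [powMod_two_eq_p2, powMod_two_eq_p2]
  rw [ansA_eq cA hrel.1 (p2 ((pairs.filter (fun p => decide (p.1 = 0 ∧ p.2 ≠ 0))).length : Int)
        + p2 ((pairs.filter (fun p => decide (p.1 ≠ 0 ∧ p.2 = 0))).length : Int) - 1)]
  rw [ansB_eq g hrel.2.1]
  rw [prod_eq_of_Rel cA g hrel]

-- ===== VERDICT (by name: the statement is the Claim_ definition above) =====
theorem solve_spec : Claim_equal_solve := by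
  intro N AB _
  show solve N AB = solve_alt N AB
  exact solve_eq N AB
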